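-- pv_equiv track=rewrite | github.com/neuspell/neuspell | scripts/candidate_generation_reranking/edit_distance.py | get_edits_sub_del
-- ===== SOURCE A (Python) =====
-- def get_edits_sub_del(str1: "original", str2: "noisy"):
--     # find edit distane as usual and only pick selected edits from it
--     len1, len2 = len(str1), len(str2)
--     dp_dist = [[-1]*len2 for _ in range(len1)]
--     dp_edits = [[[]]*len2 for _ in range(len1)]
--     best_dist, best_edits = get_edits(str1, str2, len1-1, len2-1, dp_dist, dp_edits)
--     # pick only deletions and substitutions of str1
--     for edit in best_edits:
--         if edit[-2]=="":
--             best_edits.remove(edit)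
--             best_dist-=1
--     # return the selected edits and the modified editdist
--
--     return best_dist, best_edits
--
-- def get_edits(str1, str2, ind1, ind2, dp_dist, dp_edits):
--     if ind1==-1 and ind2==-1: return 0, []
--     elif ind1==-1 and ind2>-1: return ind2+1, [(i,"",str2[i]) for i in range(ind2,-1,-1)]
--     elif ind1>-1 and ind2==-1: return ind1+1, [(i,str1[i],"") for i in range(ind1,-1,-1)]
--     if dp_dist[ind1][ind2]==-1:
--         if str1[ind1]==str2[ind2]:
--             return get_edits(str1, str2, ind1-1, ind2-1, dp_dist, dp_edits)
--         else:
--             # think and realize that changes are being made only to str1 as str2 is target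
--             # addition
--             dist1, edits1 = get_edits(str1, str2, ind1, ind2-1, dp_dist, dp_edits)
--             # substitution
--             dist2, edits2 = get_edits(str1, str2, ind1-1, ind2-1, dp_dist, dp_edits)
--             # deletion
--             dist3, edits3 = get_edits(str1, str2, ind1-1, ind2, dp_dist, dp_edits)
--             # pick least
--             if dist3<=dist2 and dist3<=dist1:
--                 dp_dist[ind1][ind2], dp_edits[ind1][ind2] = \
--                     dist3+1, edits3+[(ind1,str1[ind1],"")]
--             elif dist2<=dist3 and dist2<=dist1:
--                 dp_dist[ind1][ind2], dp_edits[ind1][ind2] = \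
--                     dist2+1, edits2+[(ind1,str1[ind1],str2[ind2])]
--             elif dist1<=dist2 and dist1<=dist3:
--                 dp_dist[ind1][ind2], dp_edits[ind1][ind2] = \
--                     dist1+1, edits1+[(ind1+1,"",str2[ind2])]
--     return dp_dist[ind1][ind2], dp_edits[ind1][ind2]
-- ===== SOURCE B (Python) =====
-- def get_edits_sub_del(str1: "original", str2: "noisy"):
--     # bottom-up numeric DP table, then one backtracking pass (preferring
--     # deletion, then substitution, then insertion on ties), then drop the
--     # insertion edits and their cost.
--     n1, n2 = len(str1), len(str2)
--     prevrow = list(range(n2 + 1))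
--     D = [prevrow]
--     for i in range(1, n1 + 1):
--         row = [i]
--         for j in range(1, n2 + 1):
--             if str1[i - 1] == str2[j - 1]:
--                 row.append(prevrow[j - 1])
--             else:
--                 row.append(1 + min(row[j - 1], prevrow[j - 1], prevrow[j]))
--         D.append(row)
--         prevrow = row
--     # backtrack from the last cell, collecting edits outermost-first
--     tail = []
--     i, j = n1, n2
--     while i > 0 and j > 0:
--         if str1[i - 1] == str2[j - 1]:
--             i -= 1; j -= 1
--             continue
--         d1, d2, d3 = D[i][j - 1], D[i - 1][j - 1], D[i - 1][j]
--         if d3 <= d2 and d3 <= d1:          # deletion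
--             tail.append((i - 1, str1[i - 1], "")); i -= 1
--         elif d2 <= d3 and d2 <= d1:        # substitution
--             tail.append((i - 1, str1[i - 1], str2[j - 1])); i -= 1; j -= 1
--         else:                              # insertion
--             tail.append((i, "", str2[j - 1])); j -= 1
--     # residual prefix edits, highest index first
--     head = []
--     while i > 0:
--         head.append((i - 1, str1[i - 1], "")); i -= 1
--     while j > 0:
--         head.append((j - 1, "", str2[j - 1])); j -= 1
--     edits = head + tail[::-1]
--     dist = D[n1][n2]
--     # keep only deletions and substitutions of str1
--     for edit in edits:
--         if edit[1] == "":
--             edits.remove(edit)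
--             dist -= 1
--     return dist, edits
-- ===== Notes on version B (the rewrite author's own statement) =====
-- stated objective: faster
-- what changed: Replaces A's memoized top-down recursion that builds a (distance, edit-list) pair in every DP cell by a bottom-up numeric distance table plus a single backtracking pass with the same tie-break order (deletion, substitution, insertion); the final filter loop over the edit list is unchanged since which insertion entries it drops and the order of the rest are observable.
import Mathlib
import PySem

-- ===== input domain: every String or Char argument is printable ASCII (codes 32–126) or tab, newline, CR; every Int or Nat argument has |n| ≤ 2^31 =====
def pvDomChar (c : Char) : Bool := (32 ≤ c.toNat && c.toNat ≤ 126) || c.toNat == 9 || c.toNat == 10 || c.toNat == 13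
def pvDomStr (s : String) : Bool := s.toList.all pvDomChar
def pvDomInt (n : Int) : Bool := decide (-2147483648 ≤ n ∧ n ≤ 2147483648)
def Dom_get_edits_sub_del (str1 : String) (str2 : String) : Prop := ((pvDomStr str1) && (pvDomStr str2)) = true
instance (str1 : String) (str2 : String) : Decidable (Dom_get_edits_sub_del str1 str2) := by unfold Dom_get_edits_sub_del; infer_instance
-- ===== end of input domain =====

-- B replaces A's memoized (distance, edit-list)-pair recursion by a bottom-up numeric
-- DP table plus one backtracking pass with the same tie-break order (asymptotically faster);
-- both Pythons end with the same textual filter loop, ported once as pvRemoveLoop.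

-- shared small helpers (both Pythons build these same values):
-- Python's one-character string str[k] (indices are in range in every reachable call)
def pvChStr (s : List Char) (k : Nat) : String := String.mk [s.getD k ' ']
-- [(i, "", str2[i]) for i in range(n-1, -1, -1)]
def pvInsBase (s2 : List Char) (n : Nat) : List (Int × String × String) :=
  (List.range n).reverse.map (fun (i : Nat) => ((i : Int), "", pvChStr s2 i))
-- [(i, str1[i], "") for i in range(m-1, -1, -1)]
def pvDelBase (s1 : List Char) (m : Nat) : List (Int × String × String) :=
  (List.range m).reverse.map (fun (i : Nat) => ((i : Int), pvChStr s1 i, ""))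
-- Python's `for edit in edits: if edit[1]=="": edits.remove(edit); dist-=1`, a loop both
-- sources contain verbatim: the for-iterator advances a slot index k each iteration while
-- list.remove = List.erase deletes the first occurrence.
def pvRemoveLoop (k : Nat) (dist : Int) (edits : List (Int × String × String)) :
    Int × List (Int × String × String) :=
  if h : k < edits.length then
    let e := edits[k]
    if e.2.1 = "" then pvRemoveLoop (k+1) (dist-1) (edits.erase e)
    else pvRemoveLoop (k+1) dist edits
  else (dist, edits)
termination_by edits.length - k
decreasing_by
  · have := List.length_erase_of_mem (List.getElem_mem h)
    omega
  · omega

-- ===== PORT A =====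
-- A's recursive `get_edits`, memoized: the 2-D lists `dp_dist`/`dp_edits` with the -1
-- "unset" sentinel are modeled as one threaded dict from (ind1, ind2) (absent = unset;
-- exact: distances are never -1 and both cells are always written together).
-- Indices are shifted by one (argument m stands for Python's ind1+1) so the recursion
-- is over Nat; the base cases -1 become 0.
def geA (s1 s2 : List Char) :
    Nat → Nat → PySem.Dict (Nat × Nat) (Int × List (Int × String × String)) →
    ((Int × List (Int × String × String)) × PySem.Dict (Nat × Nat) (Int × List (Int × String × String)))
  | 0, 0, dp => ((0, []), dp)
  | 0, n+1, dp => (((n : Int) + 1, pvInsBase s2 (n+1)), dp)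
  | m+1, 0, dp => (((m : Int) + 1, pvDelBase s1 (m+1)), dp)
  | m+1, n+1, dp =>
    match dp.get? (m, n) with
    | some v => (v, dp)
    | none =>
      if s1.getD m ' ' = s2.getD n ' ' then geA s1 s2 m n dp
      else
        let p1 := geA s1 s2 (m+1) n dp        -- addition
        let p2 := geA s1 s2 m n p1.2          -- substitution
        let p3 := geA s1 s2 m (n+1) p2.2      -- deletion
        let v :=
          if p3.1.1 ≤ p2.1.1 ∧ p3.1.1 ≤ p1.1.1 then
            (p3.1.1 + 1, p3.1.2 ++ [((m : Int), pvChStr s1 m, "")])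
          else if p2.1.1 ≤ p3.1.1 ∧ p2.1.1 ≤ p1.1.1 then
            (p2.1.1 + 1, p2.1.2 ++ [((m : Int), pvChStr s1 m, pvChStr s2 n)])
          else
            (p1.1.1 + 1, p1.1.2 ++ [((m : Int) + 1, "", pvChStr s2 n)])
        (v, p3.2.insert (m, n) v)
termination_by m n _ => m + n

def get_edits_sub_del (str1 : String) (str2 : String) : Int × (List (Int × String × String)) :=
  let s1 := str1.toList
  let s2 := str2.toList
  let r := geA s1 s2 s1.length s2.length PySem.Dict.empty
  pvRemoveLoop 0 r.1.1 r.1.2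

-- ===== PORT B =====
-- inner `for j` loop of Source B: walks the rest of str2 with a sliding window
-- (prevrow[j-1], prevrow[j]) over the previous row and the value just computed (row[j-1])
def tbRowGo (c : Char) : List Char → List Int → Int → List Int
  | d :: cs, p0 :: p1 :: rest, left =>
      let v := if c = d then p0 else 1 + min left (min p0 p1)
      v :: tbRowGo c cs (p1 :: rest) v
  | _, _, _ => []

-- outer `for i` loop: produces rows 1..n1, each from the previous one
def tbRowsGo (s2 : List Char) : List Char → List Int → Int → List (List Int)
  | [], _, _ => []
  | c :: cs, prev, i =>
      let r := i :: tbRowGo c s2 prev i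
      r :: tbRowsGo s2 cs r (i+1)

def tbTable (s1 s2 : List Char) : List (List Int) :=
  let row0 := (List.range (s2.length + 1)).map (Int.ofNat)
  row0 :: tbRowsGo s2 s1 row0 1

-- D[i][j]
def tbGet (T : List (List Int)) (i j : Nat) : Int := (T.getD i []).getD j 0

-- backtracking `while i>0 and j>0` loop: returns the collected edits (outermost first,
-- = Source B's `tail`) together with the final (i, j)
def btTail (s1 s2 : List Char) (T : List (List Int)) :
    Nat → Nat → (List (Int × String × String) × Nat × Nat)
  | m+1, n+1 =>
    if s1.getD m ' ' = s2.getD n ' ' then btTail s1 s2 T m n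
    else
      let d1 := tbGet T (m+1) n
      let d2 := tbGet T m n
      let d3 := tbGet T m (n+1)
      if d3 ≤ d2 ∧ d3 ≤ d1 then
        let r := btTail s1 s2 T m (n+1)
        (((m : Int), pvChStr s1 m, "") :: r.1, r.2)
      else if d2 ≤ d3 ∧ d2 ≤ d1 then
        let r := btTail s1 s2 T m n
        (((m : Int), pvChStr s1 m, pvChStr s2 n) :: r.1, r.2)
      else
        let r := btTail s1 s2 T (m+1) n
        (((m : Int) + 1, "", pvChStr s2 n) :: r.1, r.2)
  | m, 0 => ([], m, 0)
  | 0, n => ([], 0, n)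
termination_by m n => m + n

def get_edits_sub_del_alt (str1 : String) (str2 : String) : Int × (List (Int × String × String)) :=
  let s1 := str1.toList
  let s2 := str2.toList
  let T := tbTable s1 s2
  let r := btTail s1 s2 T s1.length s2.length
  -- head (the two residual while-loops, descending indices) ++ tail[::-1]
  let edits := pvDelBase s1 r.2.1 ++ pvInsBase s2 r.2.2 ++ r.1.reverse
  pvRemoveLoop 0 (tbGet T s1.length s2.length) edits

-- ===== PRECONDITION & SPEC =====
def Spec_get_edits_sub_del (str1 : String) (str2 : String) (out : Int × (List (Int × String × String))) : Prop := out = get_edits_sub_del_alt str1 str2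
instance (str1 : String) (str2 : String) (out : Int × (List (Int × String × String))) : Decidable (Spec_get_edits_sub_del str1 str2 out) := by unfold Spec_get_edits_sub_del; infer_instance

-- ===== CLAIM (what is proved, stated in full; the proofs are below) =====
def Claim_equal_get_edits_sub_del : Prop := ∀ (str1 : String) (str2 : String), Dom_get_edits_sub_del str1 str2 → Spec_get_edits_sub_del str1 str2 (get_edits_sub_del str1 str2)

-- ===== LEMMAS AND PROOFS =====

-- the common mathematical recursion both ports compute before the filter
def fR (s1 s2 : List Char) : Nat → Nat → Int × List (Int × String × String)
  | 0, 0 => (0, [])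
  | 0, n+1 => ((n : Int) + 1, pvInsBase s2 (n+1))
  | m+1, 0 => ((m : Int) + 1, pvDelBase s1 (m+1))
  | m+1, n+1 =>
    if s1.getD m ' ' = s2.getD n ' ' then fR s1 s2 m n
    else
      let r1 := fR s1 s2 (m+1) n
      let r2 := fR s1 s2 m n
      let r3 := fR s1 s2 m (n+1)
      if r3.1 ≤ r2.1 ∧ r3.1 ≤ r1.1 then (r3.1 + 1, r3.2 ++ [((m : Int), pvChStr s1 m, "")])
      else if r2.1 ≤ r3.1 ∧ r2.1 ≤ r1.1 then (r2.1 + 1, r2.2 ++ [((m : Int), pvChStr s1 m, pvChStr s2 n)])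
      else (r1.1 + 1, r1.2 ++ [((m : Int) + 1, "", pvChStr s2 n)])
termination_by m n => m + n

def MemoOK (s1 s2 : List Char)
    (dp : PySem.Dict (Nat × Nat) (Int × List (Int × String × String))) : Prop :=
  ∀ m n v, dp.get? (m, n) = some v → v = fR s1 s2 (m+1) (n+1)

lemma geA_spec (s1 s2 : List Char) :
    ∀ N m n dp, m + n ≤ N → MemoOK s1 s2 dp →
      (geA s1 s2 m n dp).1 = fR s1 s2 m n ∧ MemoOK s1 s2 (geA s1 s2 m n dp).2 := by
  intro N
  induction N with
  | zero =>
    intro m n dp hN hdp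
    have hm : m = 0 := by omega
    have hn : n = 0 := by omega
    subst hm; subst hn
    exact ⟨by simp [geA, fR], by simpa [geA] using hdp⟩
  | succ N ih =>
    intro m n dp hN hdp
    match m, n with
    | 0, 0 => exact ⟨by simp [geA, fR], by simpa [geA] using hdp⟩
    | 0, n+1 => exact ⟨by simp [geA, fR], by simpa [geA] using hdp⟩
    | m+1, 0 => exact ⟨by simp [geA, fR], by simpa [geA] using hdp⟩
    | m+1, n+1 =>
      cases hget : dp.get? (m, n) with
      | some v =>
        refine ⟨?_, ?_⟩
        · simp only [geA, hget]
          exact hdp m n v hget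
        · simpa only [geA, hget] using hdp
      | none =>
        by_cases hc : s1.getD m ' ' = s2.getD n ' '
        · have := ih m n dp (by omega) hdp
          refine ⟨?_, ?_⟩
          · simp only [geA, hget, if_pos hc]
            rw [fR, if_pos hc]
            exact this.1
          · simpa only [geA, hget, if_pos hc] using this.2
        · obtain ⟨e1, hdp1⟩ := ih (m+1) n dp (by omega) hdp
          obtain ⟨e2, hdp2⟩ := ih m n (geA s1 s2 (m+1) n dp).2 (by omega) hdp1
          obtain ⟨e3, hdp3⟩ :=
            ih m (n+1) (geA s1 s2 m n (geA s1 s2 (m+1) n dp).2).2 (by omega) hdp2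
          have hval :
              (if (fR s1 s2 m (n+1)).1 ≤ (fR s1 s2 m n).1 ∧ (fR s1 s2 m (n+1)).1 ≤ (fR s1 s2 (m+1) n).1 then
                ((fR s1 s2 m (n+1)).1 + 1, (fR s1 s2 m (n+1)).2 ++ [((m : Int), pvChStr s1 m, "")])
              else if (fR s1 s2 m n).1 ≤ (fR s1 s2 m (n+1)).1 ∧ (fR s1 s2 m n).1 ≤ (fR s1 s2 (m+1) n).1 then
                ((fR s1 s2 m n).1 + 1, (fR s1 s2 m n).2 ++ [((m : Int), pvChStr s1 m, pvChStr s2 n)])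
              else
                ((fR s1 s2 (m+1) n).1 + 1, (fR s1 s2 (m+1) n).2 ++ [((m : Int) + 1, "", pvChStr s2 n)]))
              = fR s1 s2 (m+1) (n+1) := by
            rw [fR, if_neg hc]
          refine ⟨?_, ?_⟩
          · simp only [geA, hget, if_neg hc, e1, e2, e3]
            exact hval
          · simp only [geA, hget, if_neg hc]
            intro a b w hw
            rw [PySem.Dict.get?_insert] at hw
            by_cases heq : ((a, b) : Nat × Nat) = (m, n)
            · rw [if_pos heq] at hw
              rw [Prod.mk.injEq] at heq
              obtain ⟨ha, hb⟩ := heq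
              subst ha; subst hb
              rw [Option.some_inj] at hw
              rw [← hw]
              simp only [e1, e2, e3]
              exact hval
            · rw [if_neg heq] at hw
              exact hdp3 a b w hw

lemma fR_fst_zero_left (s1 s2 : List Char) (j : Nat) : (fR s1 s2 0 j).1 = (j : Int) := by
  cases j <;> simp [fR]

lemma fR_fst_succ (s1 s2 : List Char) (m n : Nat)
    (hne : ¬ s1.getD m ' ' = s2.getD n ' ') :
    (fR s1 s2 (m+1) (n+1)).1 =
      1 + min ((fR s1 s2 (m+1) n).1) (min ((fR s1 s2 m n).1) ((fR s1 s2 m (n+1)).1)) := by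
  rw [fR]
  simp only [if_neg hne]
  split_ifs <;> simp only [min_def] <;> split_ifs <;> omega

lemma tbRowGo_spec (s2 : List Char) (c : Char) (g f' : Nat → Int)
    (hstep : ∀ j, j < s2.length →
      f' (j+1) = if c = s2.getD j ' ' then g j else 1 + min (f' j) (min (g j) (g (j+1)))) :
    ∀ k q, k = s2.length - q → q ≤ s2.length →
      tbRowGo c (s2.drop q) ((List.range' q (s2.length - q + 1)).map g) (f' q)
        = (List.range' (q+1) (s2.length - q)).map f' := by
  intro k
  induction k with
  | zero =>
    intro q hk hq
    have hq' : q = s2.length := by omega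
    subst hq'
    simp [List.drop_length, tbRowGo]
  | succ k ih =>
    intro q hk hq
    have hqlt : q < s2.length := by omega
    have hdrop : s2.drop q = s2[q] :: s2.drop (q+1) := List.drop_eq_getElem_cons hqlt
    have hlen : s2.length - q = k + 1 := by omega
    rw [hdrop, hlen]
    rw [show k + 1 + 1 = k + 2 from rfl]
    rw [List.range'_succ, List.range'_succ]
    simp only [List.map_cons]
    rw [tbRowGo]
    have hv : (if c = s2[q] then g q else 1 + min (f' q) (min (g q) (g (q+1)))) = f' (q+1) := by
      rw [hstep q hqlt, List.getD_eq_getElem _ _ hqlt]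
    rw [hv]
    have := ih (q+1) (by omega) (by omega)
    rw [show s2.length - (q+1) = k from by omega] at this
    rw [List.range'_succ] at this
    simp only [List.map_cons] at this
    rw [this]

def rowVals (s1 s2 : List Char) (i : Nat) : List Int :=
  (List.range (s2.length + 1)).map (fun j => (fR s1 s2 i j).1)

lemma tbRowsGo_spec (s1 s2 : List Char) :
    ∀ k p, k = s1.length - p → p ≤ s1.length →
      tbRowsGo s2 (s1.drop p) (rowVals s1 s2 p) ((p : Int) + 1)
        = (List.range' (p+1) (s1.length - p)).map (rowVals s1 s2) := by
  intro k
  induction k with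
  | zero =>
    intro p hk hp
    have hp' : p = s1.length := by omega
    subst hp'
    simp [List.drop_length, tbRowsGo]
  | succ k ih =>
    intro p hk hp
    have hplt : p < s1.length := by omega
    have hdrop : s1.drop p = s1[p] :: s1.drop (p+1) := List.drop_eq_getElem_cons hplt
    rw [hdrop, tbRowsGo]
    have hrow : ((p : Int) + 1) :: tbRowGo s1[p] s2 (rowVals s1 s2 p) ((p : Int) + 1)
        = rowVals s1 s2 (p+1) := by
      have htail := tbRowGo_spec s2 s1[p]
          (fun j => (fR s1 s2 p j).1) (fun j => (fR s1 s2 (p+1) j).1)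
          (by
            intro j hj
            show (fR s1 s2 (p+1) (j+1)).1 = _
            rw [show s1[p] = s1.getD p ' ' from (List.getD_eq_getElem _ _ hplt).symm]
            by_cases heq : s1.getD p ' ' = s2.getD j ' '
            · rw [if_pos heq]
              show _ = (fR s1 s2 p j).1
              rw [fR.eq_def]
              simp only [if_pos heq]
            · rw [if_neg heq]
              exact fR_fst_succ s1 s2 p j heq)
          s2.length 0 (by omega) (by omega)
      simp only [List.drop_zero, Nat.sub_zero] at htail
      rw [← List.range_eq_range'] at htail
      have hf0 : (fR s1 s2 (p+1) 0).1 = (p : Int) + 1 := by simp [fR]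
      unfold rowVals
      rw [show ((p:Int)+1) = (fR s1 s2 (p+1) 0).1 from hf0.symm]
      rw [htail]
      rw [List.range_eq_range', List.range'_succ, List.map_cons]
    rw [hrow]
    have hrec := ih (p+1) (by omega) (by omega)
    rw [show ((p:Int) + 1 + 1) = (((p+1 : Nat)) : Int) + 1 from by push_cast; ring]
    rw [hrec]
    rw [show s1.length - p = (s1.length - (p+1)) + 1 from by omega]
    rw [List.range'_succ, List.map_cons]

lemma tbTable_eq (s1 s2 : List Char) :
    tbTable s1 s2 = (List.range (s1.length + 1)).map (rowVals s1 s2) := by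
  unfold tbTable
  have hrow0 : (List.range (s2.length + 1)).map (Int.ofNat) = rowVals s1 s2 0 := by
    unfold rowVals
    apply List.map_congr_left
    intro j _
    rw [fR_fst_zero_left]
    rfl
  have h1 := tbRowsGo_spec s1 s2 s1.length 0 (by omega) (by omega)
  simp only [List.drop_zero, Nat.sub_zero, Nat.cast_zero, zero_add] at h1
  show (List.range (s2.length + 1)).map (Int.ofNat)
      :: tbRowsGo s2 s1 ((List.range (s2.length + 1)).map (Int.ofNat)) 1 = _
  rw [hrow0, h1, List.range_eq_range', List.range'_succ, List.map_cons]

lemma tbGet_eq (s1 s2 : List Char) (i j : Nat) (hi : i ≤ s1.length) (hj : j ≤ s2.length) :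
    tbGet (tbTable s1 s2) i j = (fR s1 s2 i j).1 := by
  unfold tbGet
  rw [tbTable_eq]
  have hi' : i < ((List.range (s1.length + 1)).map (rowVals s1 s2)).length := by
    simp; omega
  rw [List.getD_eq_getElem _ _ hi']
  rw [List.getElem_map, List.getElem_range]
  unfold rowVals
  have hj' : j < ((List.range (s2.length + 1)).map (fun j => (fR s1 s2 i j).1)).length := by
    simp; omega
  rw [List.getD_eq_getElem _ _ hj']
  rw [List.getElem_map, List.getElem_range]

lemma btTail_spec (s1 s2 : List Char) :
    ∀ N m n, m + n ≤ N → m ≤ s1.length → n ≤ s2.length →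
      pvDelBase s1 (btTail s1 s2 (tbTable s1 s2) m n).2.1 ++
        pvInsBase s2 (btTail s1 s2 (tbTable s1 s2) m n).2.2 ++
        (btTail s1 s2 (tbTable s1 s2) m n).1.reverse
      = (fR s1 s2 m n).2 := by
  intro N
  induction N with
  | zero =>
    intro m n hN h1 h2
    have hm : m = 0 := by omega
    have hn : n = 0 := by omega
    subst hm; subst hn
    simp [btTail, fR, pvDelBase, pvInsBase]
  | succ N ih =>
    intro m n hN h1 h2
    match m, n with
    | m, 0 =>
      cases m with
      | zero => simp [btTail, fR, pvDelBase, pvInsBase]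
      | succ m => simp [btTail, fR, pvInsBase]
    | 0, n+1 =>
      simp [btTail, fR, pvDelBase]
    | m+1, n+1 =>
      by_cases hc : s1.getD m ' ' = s2.getD n ' '
      · rw [btTail, if_pos hc, fR, if_pos hc]
        exact ih m n (by omega) (by omega) (by omega)
      · have hd1 : tbGet (tbTable s1 s2) (m+1) n = (fR s1 s2 (m+1) n).1 :=
          tbGet_eq s1 s2 (m+1) n h1 (by omega)
        have hd2 : tbGet (tbTable s1 s2) m n = (fR s1 s2 m n).1 :=
          tbGet_eq s1 s2 m n (by omega) (by omega)
        have hd3 : tbGet (tbTable s1 s2) m (n+1) = (fR s1 s2 m (n+1)).1 :=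
          tbGet_eq s1 s2 m (n+1) (by omega) h2
        rw [btTail, if_neg hc, fR, if_neg hc]
        simp only [hd1, hd2, hd3]
        split_ifs with h3 h2'
        · simp only [List.reverse_cons, ← List.append_assoc]
          rw [ih m (n+1) (by omega) (by omega) h2]
        · simp only [List.reverse_cons, ← List.append_assoc]
          rw [ih m n (by omega) (by omega) (by omega)]
        · simp only [List.reverse_cons, ← List.append_assoc]
          rw [ih (m+1) n (by omega) h1 (by omega)]

-- ===== VERDICT (by name: the statement is the Claim_ definition above) =====
theorem get_edits_sub_del_spec : Claim_equal_get_edits_sub_del := by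
  intro str1 str2 _
  unfold Spec_get_edits_sub_del get_edits_sub_del get_edits_sub_del_alt
  have hA := geA_spec str1.toList str2.toList (str1.toList.length + str2.toList.length)
      str1.toList.length str2.toList.length PySem.Dict.empty le_rfl
      (by intro m n v h; simp [PySem.Dict.get?_empty] at h)
  have hB := btTail_spec str1.toList str2.toList (str1.toList.length + str2.toList.length)
      str1.toList.length str2.toList.length le_rfl le_rfl le_rfl
  simp only [hA.1, hB, tbGet_eq str1.toList str2.toList _ _ le_rfl le_rfl]
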